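-- pv_equiv track=rewrite | github.com/Neural-Symbolic-Image-Labeling/Rapid | foil/model_label/foil.py | get_new_total_list
-- ===== SOURCE A (Python) =====
-- import math,re,copy,json,time
--
-- def get_new_total_list(result_list,total_list):
--     del_number_hd=[]
--     new_total=copy.deepcopy(total_list)
--     for i in range(len(result_list)):
--         if i!=len(result_list)-1:
--             for image_number,image in enumerate(total_list):
--                 del_result=True
--                 for clause in result_list[i]:
--                     if (clause not in image):        #remember the position of image that does not has special clause
--                         del_result=False
--                         break
--                 if del_result==True:
--                     del_number_hd.append(image_number)
--         else:
--             for image_number,image in enumerate(total_list):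
--                 for clause in result_list[i]:
--                     if (clause not in image):
--                         del_number_hd.append(image_number)
--                         break
--     del_number=list(set(del_number_hd))         #del_number has no duplicate
--     del_number.sort()
--     for i in range(len(del_number)):
--         del new_total[del_number[len(del_number)-1-i]]               #the position is in positive sequence, first delete the back one
--     return new_total   #two dimentional list, get the result which not has the positive that satisfy right side
-- ===== SOURCE B (Python) =====
-- import copy
--
-- def get_new_total_list(result_list, total_list):
--     if not result_list:
--         return copy.deepcopy(total_list)
--     last = result_list[-1]
--     earlier = result_list[:-1]
--     return [copy.deepcopy(img) for img in total_list
--             if all(c in img for c in last)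
--             and not any(all(c in img for c in cs) for cs in earlier)]
-- ===== Notes on version B (the rewrite author's own statement) =====
-- stated objective: simpler
-- what changed: A collects indices of images to delete over all clause sets, deduplicates, sorts and deletes rows back-to-front; B is a single image-centric filter that keeps an image iff it satisfies the last clause set and fails every earlier one (empty result_list keeps everything).
import Mathlib
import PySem

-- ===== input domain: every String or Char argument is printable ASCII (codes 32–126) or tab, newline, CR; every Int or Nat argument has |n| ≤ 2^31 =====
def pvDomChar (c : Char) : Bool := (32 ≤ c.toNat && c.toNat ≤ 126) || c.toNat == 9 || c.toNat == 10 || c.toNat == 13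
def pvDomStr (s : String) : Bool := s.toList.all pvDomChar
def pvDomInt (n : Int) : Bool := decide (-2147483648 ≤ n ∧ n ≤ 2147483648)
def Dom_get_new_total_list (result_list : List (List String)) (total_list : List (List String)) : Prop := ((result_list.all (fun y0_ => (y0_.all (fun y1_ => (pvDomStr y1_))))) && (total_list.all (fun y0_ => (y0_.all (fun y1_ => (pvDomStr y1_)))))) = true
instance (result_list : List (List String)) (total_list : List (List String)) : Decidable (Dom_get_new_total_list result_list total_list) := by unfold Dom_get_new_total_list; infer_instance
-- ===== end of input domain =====

-- B replaces A's delete-index collection + reverse deletion by a single image-centric filter (simpler); return-value equivalence only (A does not mutate its arguments, deep copies are identity here).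

-- B replaces A's delete-index collection, dedup, sort and back-to-front row deletion by a single image-centric filter (simpler); equivalence is about the return value (A mutates neither argument; Python's deep copies are identity here).

-- ===== PORT A =====
-- A's innermost loop over result_list[i] with its early break: false as soon as a clause is missing from the image
def pvAllIn (clauses : List String) (image : List String) : Bool :=
  match clauses with
  | [] => true
  | c :: rest => if !(image.contains c) then false else pvAllIn rest image

def get_new_total_list (result_list : List (List String)) (total_list : List (List String)) : List (List String) :=
  let n := result_list.length
  let del_number_hd : List Int :=
    (List.range n).foldl (fun acc i =>
      if i ≠ n - 1 then
        (PySem.List.enumerate total_list).foldl (fun acc2 p =>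
          if pvAllIn (result_list.getD i []) p.2 then acc2 ++ [p.1] else acc2) acc
      else
        (PySem.List.enumerate total_list).foldl (fun acc2 p =>
          if !(pvAllIn (result_list.getD i []) p.2) then acc2 ++ [p.1] else acc2) acc) []
  let del_number : List Int := PySem.List.sorted (PySem.Set.ofList del_number_hd) (fun x => x) false
  (List.range del_number.length).foldl (fun nt i =>
    nt.eraseIdx (del_number.getD (del_number.length - 1 - i) 0).toNat) total_list


-- ===== PORT B =====
-- all(c in img for c in clauses)
def pvSat (image : List String) (clauses : List String) : Bool := clauses.all (fun c => image.contains c)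

def get_new_total_list_alt (result_list : List (List String)) (total_list : List (List String)) : List (List String) :=
  match result_list.getLast? with
  | none => total_list
  | some last =>
    total_list.filter (fun img =>
      pvSat img last && !(result_list.dropLast.any (fun cs => pvSat img cs)))


-- ===== PRECONDITION & SPEC =====
def Spec_get_new_total_list (result_list : List (List String)) (total_list : List (List String)) (out : List (List String)) : Prop := out = get_new_total_list_alt result_list total_list
instance (result_list : List (List String)) (total_list : List (List String)) (out : List (List String)) : Decidable (Spec_get_new_total_list result_list total_list out) := by unfold Spec_get_new_total_list; infer_instance

-- ===== CLAIM (what is proved, stated in full; the proofs are below) =====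
def Claim_equal_get_new_total_list : Prop := ∀ (result_list : List (List String)) (total_list : List (List String)), Dom_get_new_total_list result_list total_list → Spec_get_new_total_list result_list total_list (get_new_total_list result_list total_list)

-- ===== LEMMAS AND PROOFS =====

theorem pvAllIn_eq_pvSat (clauses image : List String) : pvAllIn clauses image = pvSat image clauses := by
  induction clauses with
  | nil => rfl
  | cons c rest ih =>
      by_cases h : image.contains c = true <;> simp [pvAllIn, pvSat, List.all_cons] <;> simp [pvSat] at ih <;> simp [ih]

theorem enumerate_shift {α : Type} (xs : List α) (s : Int) :
    PySem.List.enumerate xs s = (PySem.List.enumerate xs 0).map (fun p => (p.1 + s, p.2)) := by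
  induction xs generalizing s with
  | nil => simp [PySem.List.enumerate_nil]
  | cons x t ih =>
      rw [PySem.List.enumerate_cons, PySem.List.enumerate_cons, ih (s+1), ih (0+1)]
      simp [List.map_map, Function.comp]
      intros; omega

theorem foldr_erase_cons (ds : List Int) (h : ∀ d ∈ ds, 0 ≤ d) (x : List String) (r : List (List String)) :
    ds.foldr (fun d s => s.eraseIdx (d + 1).toNat) (x :: r)
      = x :: ds.foldr (fun d s => s.eraseIdx d.toNat) r := by
  induction ds with
  | nil => rfl
  | cons d rest ih =>
      have hd : 0 ≤ d := h d (by simp)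
      have h1 : (d + 1).toNat = d.toNat + 1 := by omega
      simp only [List.foldr_cons, ih (fun e he => h e (by simp [he])), h1, List.eraseIdx_cons_succ]

theorem foldr_erase_filter (Q : List String → Bool) (xs : List (List String)) :
    (((PySem.List.enumerate xs 0).filter (fun p => !Q p.2)).map (fun p => p.1)).foldr
      (fun d s => s.eraseIdx d.toNat) xs = xs.filter Q := by
  induction xs with
  | nil => simp [PySem.List.enumerate_nil]
  | cons x t ih =>
      have hnn : ∀ d ∈ ((PySem.List.enumerate t 0).filter (fun p => !Q p.2)).map (fun p => p.1), 0 ≤ d := by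
        intro d hmem
        simp only [List.mem_map, List.mem_filter] at hmem
        obtain ⟨p, ⟨hp, _⟩, rfl⟩ := hmem
        rw [PySem.List.mem_enumerate_iff] at hp
        obtain ⟨k, hk, rfl⟩ := hp
        simp
      rw [PySem.List.enumerate_cons, enumerate_shift t (0+1)]
      have hshift : (((PySem.List.enumerate t 0).map (fun (p : Int × List String) => (p.1 + (0+1), p.2))).filter
            (fun p => !Q p.2)).map (fun p => p.1)
          = (((PySem.List.enumerate t 0).filter (fun p => !Q p.2)).map (fun p => p.1)).map (fun d => d + 1) := by
        rw [List.filter_map, List.map_map, List.map_map]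
        exact List.map_congr_left (fun p _ => by simp)
      by_cases hQ : Q x = true
      · simp only [List.filter_cons, hQ, Bool.not_true, Bool.false_eq_true, if_false]
        rw [hshift, List.foldr_map, foldr_erase_cons _ hnn, ih]
        simp
      · have hQ' : Q x = false := by simpa using hQ
        simp only [List.filter_cons, hQ', Bool.not_false, if_true, List.map_cons]
        rw [hshift, List.foldr_cons, List.foldr_map, foldr_erase_cons _ hnn, ih]
        simp

theorem loop_eq_foldr (ds : List Int) (xs : List (List String)) :
    (List.range ds.length).foldl (fun nt i => nt.eraseIdx (ds.getD (ds.length - 1 - i) 0).toNat) xs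
      = ds.foldr (fun d s => s.eraseIdx d.toNat) xs := by
  have hmap : (List.range ds.length).map (fun i => ds.getD (ds.length - 1 - i) 0) = ds.reverse := by
    apply List.ext_getElem
    · simp
    · intro i h1 h2
      simp at h1
      rw [List.getElem_map, List.getElem_range, List.getElem_reverse,
          List.getD_eq_getElem _ _ (by omega)]
  calc (List.range ds.length).foldl (fun nt i => nt.eraseIdx (ds.getD (ds.length - 1 - i) 0).toNat) xs
      = ((List.range ds.length).map (fun i => ds.getD (ds.length - 1 - i) 0)).foldl
          (fun nt d => nt.eraseIdx d.toNat) xs := by rw [List.foldl_map]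
    _ = ds.reverse.foldl (fun nt d => nt.eraseIdx d.toNat) xs := by rw [hmap]
    _ = ds.foldr (fun d s => s.eraseIdx d.toNat) xs := by rw [List.foldl_reverse]

theorem main_eq (rl tl : List (List String)) : get_new_total_list rl tl = get_new_total_list_alt rl tl := by
  rcases eq_or_ne rl [] with rfl | hne
  · rfl
  · have hn : 1 ≤ rl.length := List.length_pos_iff.mpr hne
    set n := rl.length with hn_def
    set Q : List String → Bool := fun img =>
      pvSat img (rl.getLast hne) && !(rl.dropLast.any (fun cs => pvSat img cs)) with hQ_def
    have halt : get_new_total_list_alt rl tl = tl.filter Q := by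
      rw [get_new_total_list_alt, List.getLast?_eq_some_getLast hne]
    -- characterize hd membership
    set hd : List Int :=
      (List.range n).foldl (fun acc i =>
        if i ≠ n - 1 then
          (PySem.List.enumerate tl).foldl (fun acc2 p =>
            if pvAllIn (rl.getD i []) p.2 then acc2 ++ [p.1] else acc2) acc
        else
          (PySem.List.enumerate tl).foldl (fun acc2 p =>
            if !(pvAllIn (rl.getD i []) p.2) then acc2 ++ [p.1] else acc2) acc) [] with hd_def
    have hd_flat : hd = (List.range n).flatMap (fun i =>
        if i ≠ n - 1 then
          ((PySem.List.enumerate tl).filter (fun p => pvAllIn (rl.getD i []) p.2)).map (fun p => p.1)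
        else
          ((PySem.List.enumerate tl).filter (fun p => !(pvAllIn (rl.getD i []) p.2))).map (fun p => p.1)) := by
      rw [hd_def]
      rw [show (fun (acc : List Int) i =>
        if i ≠ n - 1 then
          (PySem.List.enumerate tl).foldl (fun acc2 p =>
            if pvAllIn (rl.getD i []) p.2 then acc2 ++ [p.1] else acc2) acc
        else
          (PySem.List.enumerate tl).foldl (fun acc2 p =>
            if !(pvAllIn (rl.getD i []) p.2) then acc2 ++ [p.1] else acc2) acc)
        = (fun acc i => acc ++ (if i ≠ n - 1 then
            ((PySem.List.enumerate tl).filter (fun p => pvAllIn (rl.getD i []) p.2)).map (fun p => p.1)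
          else
            ((PySem.List.enumerate tl).filter (fun p => !(pvAllIn (rl.getD i []) p.2))).map (fun p => p.1)))
        from funext fun acc => funext fun i => by
          by_cases h : i = n - 1 <;> simp only [PySem.List.foldl_append_if] <;> simp [h]]
      rw [PySem.List.foldl_append_eq_flatMap]
      simp
    have hmemmap : ∀ (pred : (Int × List String) → Bool) (j : Int),
        j ∈ ((PySem.List.enumerate tl).filter pred).map (fun p => p.1) ↔
          ∃ (k : Nat) (hk : k < tl.length), j = (k : Int) ∧ pred ((k : Int), tl[k]) = true := by
      intro pred j
      simp only [List.mem_map, List.mem_filter, PySem.List.mem_enumerate_iff]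
      constructor
      · rintro ⟨p, ⟨⟨k, hk, rfl⟩, hp⟩, rfl⟩
        exact ⟨k, hk, by simp, by simpa using hp⟩
      · rintro ⟨k, hk, rfl, hp⟩
        exact ⟨((k : Int), tl[k]), ⟨⟨k, hk, by simp⟩, by simpa using hp⟩, rfl⟩
    have hlast : rl.getD (n - 1) [] = rl.getLast hne := by
      rw [List.getLast_eq_getElem, List.getD_eq_getElem _ _ (by omega)]
    have hdl : ∀ cs, cs ∈ rl.dropLast ↔ ∃ (i : Nat) (hi : i < n - 1), cs = rl[i] := by
      intro cs
      rw [List.mem_iff_getElem]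
      constructor
      · rintro ⟨i, hi, rfl⟩
        rw [List.length_dropLast] at hi
        exact ⟨i, hi, by rw [List.getElem_dropLast]⟩
      · rintro ⟨i, hi, rfl⟩
        exact ⟨i, by rw [List.length_dropLast]; omega, by rw [List.getElem_dropLast]⟩
    have hQfalse : ∀ img, Q img = false ↔
        (pvSat img (rl.getLast hne) = false ∨ ∃ cs ∈ rl.dropLast, pvSat img cs = true) := by
      intro img
      rw [hQ_def]
      cases h1 : pvSat img (rl.getLast hne) <;>
        cases h2 : rl.dropLast.any (fun cs => pvSat img cs) <;>
          simp_all [List.any_eq_true]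
    have hchar : ∀ j : Int, j ∈ hd ↔ ∃ (k : Nat) (hk : k < tl.length), j = (k : Int) ∧ Q tl[k] = false := by
      intro j
      rw [hd_flat]
      simp only [List.mem_flatMap, List.mem_range]
      constructor
      · rintro ⟨i, hi, hmem⟩
        by_cases h : i = n - 1
        · subst h
          rw [if_neg (by simp)] at hmem
          rw [hmemmap] at hmem
          obtain ⟨k, hk, rfl, hp⟩ := hmem
          refine ⟨k, hk, rfl, ?_⟩
          rw [hQfalse]
          left
          rw [← hlast, ← pvAllIn_eq_pvSat]
          simpa using hp
        · rw [if_pos h] at hmem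
          rw [hmemmap] at hmem
          obtain ⟨k, hk, rfl, hp⟩ := hmem
          refine ⟨k, hk, rfl, ?_⟩
          rw [hQfalse]
          right
          refine ⟨rl.getD i [], ?_, by rw [← pvAllIn_eq_pvSat]; exact hp⟩
          rw [hdl]
          exact ⟨i, by omega, by rw [List.getD_eq_getElem _ _ (by omega)]⟩
      · rintro ⟨k, hk, rfl, hQf⟩
        rw [hQfalse] at hQf
        rcases hQf with hsat | ⟨cs, hcs, hsat⟩
        · refine ⟨n - 1, by omega, ?_⟩
          rw [if_neg (by simp)]
          rw [hmemmap]
          refine ⟨k, hk, rfl, ?_⟩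
          simp only [hlast, pvAllIn_eq_pvSat, hsat]
          rfl
        · rw [hdl] at hcs
          obtain ⟨i, hi, rfl⟩ := hcs
          refine ⟨i, by omega, ?_⟩
          rw [if_pos (by omega)]
          rw [hmemmap]
          refine ⟨k, hk, rfl, ?_⟩
          rw [pvAllIn_eq_pvSat, List.getD_eq_getElem _ _ (by omega)]
          exact hsat
    -- del_number is the ascending index list of images failing Q
    set ds : List Int := ((PySem.List.enumerate tl).filter (fun p => !Q p.2)).map (fun p => p.1) with ds_def
    have hds_char : ∀ j : Int, j ∈ ds ↔ ∃ (k : Nat) (hk : k < tl.length), j = (k : Int) ∧ Q tl[k] = false := by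
      intro j
      rw [ds_def, hmemmap]
      constructor
      · rintro ⟨k, hk, rfl, hp⟩
        exact ⟨k, hk, rfl, by simpa using hp⟩
      · rintro ⟨k, hk, rfl, hp⟩
        exact ⟨k, hk, rfl, by simpa using hp⟩
    have hpair : ds.Pairwise (· < ·) := by
      rw [ds_def]
      exact List.pairwise_map.mpr ((PySem.List.pairwise_lt_enumerate tl 0).filter _)
    have hnodup : ds.Nodup := hpair.imp (fun h => ne_of_lt h)
    have hperm : ds.Perm (PySem.Set.ofList hd) := by
      rw [List.perm_ext_iff_of_nodup hnodup (PySem.Set.nodup_ofList hd)]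
      intro j
      rw [hds_char, PySem.Set.mem_ofList, hchar]
    have hsorted : PySem.List.sorted (PySem.Set.ofList hd) (fun x => x) false = ds :=
      PySem.List.sorted_eq_of_perm_of_pairwise_lt _ _ _ hperm hpair
    rw [halt]
    show (List.range (PySem.List.sorted (PySem.Set.ofList hd) (fun x => x) false).length).foldl
        (fun nt i => nt.eraseIdx ((PySem.List.sorted (PySem.Set.ofList hd) (fun x => x) false).getD
          ((PySem.List.sorted (PySem.Set.ofList hd) (fun x => x) false).length - 1 - i) 0).toNat) tl
      = tl.filter Q
    rw [hsorted, ds_def, loop_eq_foldr, foldr_erase_filter]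

-- ===== VERDICT (by name: the statement is the Claim_ definition above) =====
theorem get_new_total_list_spec : Claim_equal_get_new_total_list := by
  intro rl tl _
  unfold Spec_get_new_total_list
  exact main_eq rl tl
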